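-- pv_equiv track=rewrite | github.com/ryangerardwilson/gmail | gmail_cli/formatters.py | _trim_body
-- ===== SOURCE A (Python) =====
-- def _trim_body(body: str, max_lines: int = 24, max_chars: int = 2000) -> str:
--     if not body:
--         return ""
--
--     lines = body.splitlines()
--     condensed: list[str] = []
--     blank_count = 0
--     for line in lines:
--         if line.strip():
--             blank_count = 0
--             condensed.append(line.rstrip())
--             continue
--
--         blank_count += 1
--         if blank_count <= 1:
--             condensed.append("")
--
--     body_text = "\n".join(condensed).strip()
--
--     was_trimmed = False
--     if len(body_text) > max_chars:
--         body_text = body_text[:max_chars].rstrip()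
--         was_trimmed = True
--
--     split_lines = body_text.splitlines()
--     if len(split_lines) > max_lines:
--         body_text = "\n".join(split_lines[:max_lines]).rstrip()
--         was_trimmed = True
--
--     return body_text
-- ===== SOURCE B (Python) =====
-- def _trim_body(body: str, max_lines: int = 24, max_chars: int = 2000) -> str:
--     if not body:
--         return ""
--
--     lines = body.splitlines()
--     # Two-pointer sweep over maximal runs of equally-blank lines: a blank run
--     # contributes a single "", a non-blank run contributes its rstripped lines.
--     condensed: list[str] = []
--     n = len(lines)
--     i = 0
--     while i < n:
--         blank = not lines[i].strip()
--         j = i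
--         while j < n and (not lines[j].strip()) == blank:
--             j += 1
--         if blank:
--             condensed.append("")
--         else:
--             condensed.extend(line.rstrip() for line in lines[i:j])
--         i = j
--
--     body_text = "\n".join(condensed).strip()
--
--     if len(body_text) > max_chars:
--         body_text = body_text[:max_chars].rstrip()
--
--     split_lines = body_text.splitlines()
--     if len(split_lines) > max_lines:
--         body_text = "\n".join(split_lines[:max_lines]).rstrip()
--
--     return body_text
-- ===== Notes on version B (the rewrite author's own statement) =====
-- stated objective: alternative
-- what changed: A's single stateful pass with a running blank_count is replaced by a two-pointer sweep that segments the lines into maximal runs of equally-blank lines, emitting a single empty line per blank run and the rstripped lines of each non-blank run; the char/line capping tail is unchanged.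
import Mathlib
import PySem

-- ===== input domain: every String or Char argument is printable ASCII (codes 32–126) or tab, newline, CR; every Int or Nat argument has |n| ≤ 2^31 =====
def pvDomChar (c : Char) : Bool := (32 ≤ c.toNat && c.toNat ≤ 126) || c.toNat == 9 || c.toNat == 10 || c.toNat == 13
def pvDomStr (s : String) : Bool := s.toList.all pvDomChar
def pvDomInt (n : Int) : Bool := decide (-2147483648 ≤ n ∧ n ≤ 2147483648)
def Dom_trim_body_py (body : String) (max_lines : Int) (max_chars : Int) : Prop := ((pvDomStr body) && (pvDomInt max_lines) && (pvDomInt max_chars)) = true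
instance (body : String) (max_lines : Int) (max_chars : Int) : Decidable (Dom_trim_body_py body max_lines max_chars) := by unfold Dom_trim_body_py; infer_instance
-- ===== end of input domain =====

-- B replaces A's stateful blank_count loop by a two-pointer sweep over maximal
-- runs of equally-blank lines (objective: alternative); the capping tail is unchanged.

-- ===== PORT A =====
-- the body of A's for-loop over lines (state: condensed list, blank_count)
def pvStepA (st : List String × Int) (line : String) : List String × Int :=
  if PySem.Str.strip line != "" then (st.1 ++ [PySem.Str.rstrip line], 0)
  else
    let bc := st.2 + 1
    if bc ≤ 1 then (st.1 ++ [""], bc) else (st.1, bc)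

def trim_body_py (body : String) (max_lines : Int) (max_chars : Int) : String :=
  if body == "" then "" else
  let lines := PySem.Str.splitlines body
  let condensed := (lines.foldl pvStepA ([], 0)).1
  let body_text := PySem.Str.strip (PySem.Str.join "\n" condensed)
  let body_text :=
    if (PySem.Str.len body_text : Int) > max_chars then
      PySem.Str.rstrip (PySem.Str.slice body_text none (some max_chars))
    else body_text
  let split_lines := PySem.Str.splitlines body_text
  let body_text :=
    if (split_lines.length : Int) > max_lines then
      PySem.Str.rstrip (PySem.Str.join "\n" (PySem.List.slice split_lines none (some max_lines)))
    else body_text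
  body_text

-- ===== PORT B =====
def pvBlank (l : String) : Bool := PySem.Str.strip l == ""

-- B's inner while loop: the maximal run of lines sharing blankness `b` is the
-- head together with the takeWhile prefix; the outer loop resumes at dropWhile.
def pvRuns : List String → List (Bool × List String)
  | [] => []
  | l :: ls =>
    (pvBlank l, l :: ls.takeWhile (fun x => pvBlank x == pvBlank l)) ::
      pvRuns (ls.dropWhile (fun x => pvBlank x == pvBlank l))
termination_by ls => ls.length
decreasing_by exact Nat.lt_succ_of_le (List.length_dropWhile_le _ _)

-- what B appends for one run: one "" for a blank run, rstripped lines otherwise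
def pvEmit : Bool × List String → List String
  | (b, run) => if b then [""] else run.map PySem.Str.rstrip

def trim_body_py_alt (body : String) (max_lines : Int) (max_chars : Int) : String :=
  if body == "" then "" else
  let lines := PySem.Str.splitlines body
  let condensed := (pvRuns lines).flatMap pvEmit
  let body_text := PySem.Str.strip (PySem.Str.join "\n" condensed)
  let body_text :=
    if (PySem.Str.len body_text : Int) > max_chars then
      PySem.Str.rstrip (PySem.Str.slice body_text none (some max_chars))
    else body_text
  let split_lines := PySem.Str.splitlines body_text
  let body_text :=
    if (split_lines.length : Int) > max_lines then
      PySem.Str.rstrip (PySem.Str.join "\n" (PySem.List.slice split_lines none (some max_lines)))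
    else body_text
  body_text

-- ===== PRECONDITION & SPEC =====
def Spec_trim_body_py (body : String) (max_lines : Int) (max_chars : Int) (out : String) : Prop := out = trim_body_py_alt body max_lines max_chars
instance (body : String) (max_lines : Int) (max_chars : Int) (out : String) : Decidable (Spec_trim_body_py body max_lines max_chars out) := by unfold Spec_trim_body_py; infer_instance

-- ===== CLAIM (what is proved, stated in full; the proofs are below) =====
def Claim_equal_trim_body_py : Prop := ∀ (body : String) (max_lines : Int) (max_chars : Int), Dom_trim_body_py body max_lines max_chars → Spec_trim_body_py body max_lines max_chars (trim_body_py body max_lines max_chars)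

-- ===== LEMMAS AND PROOFS =====

-- reference form of A's condensed list: structural recursion carrying a
-- "previous line was blank" flag
def pvAux : List String → Bool → List String
  | [], _ => []
  | l :: ls, pb =>
    if pvBlank l then (if pb then pvAux ls true else "" :: pvAux ls true)
    else PySem.Str.rstrip l :: pvAux ls false

theorem pvFoldA (ls : List String) (acc : List String) (bc : Int) (hbc : 0 ≤ bc) :
    (ls.foldl pvStepA (acc, bc)).1 = acc ++ pvAux ls (bc != 0) := by
  induction ls generalizing acc bc with
  | nil => simp [pvAux]
  | cons l ls ih =>
    rw [List.foldl_cons]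
    by_cases hs : PySem.Str.strip l = ""
    · by_cases hz : bc = 0
      · subst hz
        have hstep : pvStepA (acc, (0 : Int)) l = (acc ++ [""], 1) := by
          simp [pvStepA, hs]
        rw [hstep, ih (acc ++ [""]) 1 (by omega)]
        have h1 : ((1 : Int) != 0) = true := by decide
        simp [pvAux, pvBlank, hs, h1]
      · have hstep : pvStepA (acc, bc) l = (acc, bc + 1) := by
          simp [pvStepA, hs, show ¬ (bc + 1 ≤ 1) from by omega]
        rw [hstep, ih acc (bc + 1) (by omega)]
        have h1 : (bc + 1 != 0) = true := by simpa using (by omega : bc + 1 ≠ 0)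
        have h2 : (bc != 0) = true := by simpa using hz
        simp [pvAux, pvBlank, hs, h1, h2]
    · have hstep : pvStepA (acc, bc) l = (acc ++ [PySem.Str.rstrip l], 0) := by
        simp [pvStepA, hs]
      rw [hstep, ih (acc ++ [PySem.Str.rstrip l]) 0 (by omega)]
      simp [pvAux, pvBlank, hs]

-- flattening with the leading blank run's "" suppressed (used when the
-- previous line was already blank)
def pvFlatT : List (Bool × List String) → List String
  | [] => []
  | (b, run) :: rest =>
    if b then (rest.flatMap pvEmit) else pvEmit (b, run) ++ rest.flatMap pvEmit

-- a non-blank prefix contributes its rstripped lines in front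
theorem pvLemA (ls : List String) :
    (ls.takeWhile (fun x => pvBlank x == false)).map PySem.Str.rstrip
      ++ pvAux (ls.dropWhile (fun x => pvBlank x == false)) false = pvAux ls false := by
  induction ls with
  | nil => simp [pvAux]
  | cons l ls ih =>
    simp only [List.takeWhile_cons, List.dropWhile_cons]
    by_cases hb : pvBlank l
    · rw [show (pvBlank l == false) = false by simp [hb]]
      simp
    · rw [show (pvBlank l == false) = true by simp [hb], if_pos rfl, if_pos rfl,
        List.map_cons, List.cons_append, ih]
      simp only [pvAux]
      rw [if_neg hb]

-- dropping a blank prefix matches pvAux's blank-suppressing flag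
theorem pvLemB (ls : List String) :
    pvAux (ls.dropWhile (fun x => pvBlank x == true)) false = pvAux ls true := by
  induction ls with
  | nil => simp [pvAux]
  | cons l ls ih =>
    by_cases hb : pvBlank l
    · simp only [List.dropWhile_cons]
      rw [show (pvBlank l == true) = true by simp [hb], if_pos rfl, ih]
      simp [pvAux, hb]
    · simp only [List.dropWhile_cons]
      rw [show (pvBlank l == true) = false by simp [hb]]
      simp [pvAux, hb]

theorem pvMain (ls : List String) :
    (pvRuns ls).flatMap pvEmit = pvAux ls false ∧
      pvFlatT (pvRuns ls) = pvAux ls true := by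
  induction ls using pvRuns.induct with
  | case1 => simp [pvRuns, pvAux, pvFlatT]
  | case2 l ls ih =>
    obtain ⟨ih1, ih2⟩ := ih
    by_cases hbl : pvBlank l
    · rw [pvRuns]
      rw [hbl] at ih1 ih2 ⊢
      constructor
      · simp only [List.flatMap_cons, pvEmit]
        rw [ih1, pvLemB]
        simp [pvAux, hbl]
      · simp only [pvFlatT]
        rw [ih1, pvLemB]
        simp [pvAux, hbl]
    · rw [pvRuns]
      have hbf : pvBlank l = false := by simpa using hbl
      rw [hbf] at ih1 ih2 ⊢
      have hmain : pvEmit (false, l :: ls.takeWhile fun x => pvBlank x == false)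
          ++ (pvRuns (ls.dropWhile fun x => pvBlank x == false)).flatMap pvEmit
          = pvAux (l :: ls) false := by
        simp only [pvEmit, if_neg (by decide : ¬ (false : Bool) = true), List.map_cons]
        rw [List.cons_append, ih1, pvLemA]
        simp [pvAux, hbl]
      constructor
      · simpa [List.flatMap_cons] using hmain
      · have : pvAux (l :: ls) true = pvAux (l :: ls) false := by simp [pvAux, hbl]
        rw [this, pvFlatT, if_neg (by decide : ¬ (false : Bool) = true)]
        exact hmain

-- ===== VERDICT (by name: the statement is the Claim_ definition above) =====
theorem trim_body_py_spec : Claim_equal_trim_body_py := by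
  intro body max_lines max_chars _
  unfold Spec_trim_body_py trim_body_py trim_body_py_alt
  by_cases hb : body == ""
  · simp [hb]
  · simp only [hb, Bool.false_eq_true, if_false]
    have hA := pvFoldA (PySem.Str.splitlines body) [] 0 le_rfl
    have hB := (pvMain (PySem.Str.splitlines body)).1
    simp only [show ((0 : Int) != 0) = false by decide] at hA
    rw [hA, hB]
    rfl
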